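-- pv_equiv track=rewrite | github.com/zhoubot/pyCircuit | compiler/frontend/pycircuit/logic/__init__.py | onehot_mux
-- ===== SOURCE A (Python) =====
-- from typing import Any, Sequence
--
-- def onehot_mux(sel: Sequence[Any], vals: Sequence[Any]) -> Any:
--     if len(sel) == 0 or len(vals) == 0:
--         raise ValueError("onehot_mux requires non-empty sel/vals")
--     if len(sel) != len(vals):
--         raise ValueError(f"onehot_mux length mismatch: sel={len(sel)} vals={len(vals)}")
--
--     out = vals[0] ^ vals[0]
--     for s, v in zip(sel, vals):
--         out = v if s else out
--     return out
-- ===== SOURCE B (Python) =====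
-- def onehot_mux(sel, vals):
--     if len(sel) == 0 or len(vals) == 0:
--         raise ValueError("onehot_mux requires non-empty sel/vals")
--     if len(sel) != len(vals):
--         raise ValueError(f"onehot_mux length mismatch: sel={len(sel)} vals={len(vals)}")
--     zero = vals[0] ^ vals[0]
--     for i in reversed(range(len(sel))):
--         if sel[i]:
--             return vals[i]
--     return zero
-- ===== Notes on version B (the rewrite author's own statement) =====
-- stated objective: alternative
-- what changed: Replaced the forward accumulate-and-overwrite fold with a reverse scan that early-returns the value at the last truthy selector, falling back to the precomputed zero.
import Mathlib
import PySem

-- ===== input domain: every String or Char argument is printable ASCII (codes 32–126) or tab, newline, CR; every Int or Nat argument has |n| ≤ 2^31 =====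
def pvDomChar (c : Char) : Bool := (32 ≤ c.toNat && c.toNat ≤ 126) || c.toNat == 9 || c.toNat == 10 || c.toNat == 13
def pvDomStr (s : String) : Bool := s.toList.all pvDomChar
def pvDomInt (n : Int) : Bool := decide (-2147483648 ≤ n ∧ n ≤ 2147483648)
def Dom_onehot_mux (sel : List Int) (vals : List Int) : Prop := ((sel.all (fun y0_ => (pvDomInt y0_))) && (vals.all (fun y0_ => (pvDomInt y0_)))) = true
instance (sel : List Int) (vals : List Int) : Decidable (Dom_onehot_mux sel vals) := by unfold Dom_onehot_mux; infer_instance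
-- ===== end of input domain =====

-- B: reverse search-and-early-return for the last truthy selector, instead of A's forward accumulate-and-overwrite fold (return value equivalence on Pre_; A raises outside Pre_).
-- ===== PORT A =====
-- out = vals[0] ^ vals[0]; for s, v in zip(sel, vals): out = v if s else out
def onehot_mux (sel : List Int) (vals : List Int) : Int :=
  match vals with
  | [] => 0  -- unreachable under Pre_ (Python raises ValueError)
  | v0 :: _ =>
    (sel.zip vals).foldl (fun out sv => if sv.1 ≠ 0 then sv.2 else out) (Int.xor v0 v0)

-- ===== PORT B =====
-- reverse scan over zipped pairs, early return at first truthy sel from the right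
def altLoop (l : List (Int × Int)) (zero : Int) : Int :=
  match l with
  | [] => zero
  | sv :: rest => if sv.1 ≠ 0 then sv.2 else altLoop rest zero

def onehot_mux_alt (sel : List Int) (vals : List Int) : Int :=
  match vals with
  | [] => 0  -- unreachable under Pre_ (Python raises ValueError)
  | v0 :: _ => altLoop ((sel.zip vals).reverse) (Int.xor v0 v0)

-- ===== PRECONDITION & SPEC =====
-- Pre_ excludes exactly the inputs where A raises ValueError: empty or mismatched-length sequences.
def Pre_onehot_mux (sel : List Int) (vals : List Int) : Prop :=
  sel ≠ [] ∧ vals ≠ [] ∧ sel.length = vals.length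
instance (sel : List Int) (vals : List Int) : Decidable (Pre_onehot_mux sel vals) := by
  unfold Pre_onehot_mux; infer_instance
def pvWitness_onehot_mux : List Int × List Int := ([0, 1, 0], [3, 7, 9])

def Spec_onehot_mux (sel : List Int) (vals : List Int) (out : Int) : Prop := out = onehot_mux_alt sel vals
instance (sel : List Int) (vals : List Int) (out : Int) : Decidable (Spec_onehot_mux sel vals out) := by unfold Spec_onehot_mux; infer_instance

-- ===== CLAIM (what is proved, stated in full; the proofs are below) =====
def Claim_equal_onehot_mux : Prop := ∀ (sel : List Int) (vals : List Int), Dom_onehot_mux sel vals → Pre_onehot_mux sel vals → Spec_onehot_mux sel vals (onehot_mux sel vals)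

-- ===== LEMMAS AND PROOFS =====
theorem altLoop_append (a b : List (Int × Int)) (z : Int) :
    altLoop (a ++ b) z = altLoop a (altLoop b z) := by
  induction a with
  | nil => rfl
  | cons x xs ih => simp only [List.cons_append, altLoop, ih]

theorem fold_eq_altLoop (l : List (Int × Int)) (z : Int) :
    l.foldl (fun out sv => if sv.1 ≠ 0 then sv.2 else out) z = altLoop l.reverse z := by
  induction l generalizing z with
  | nil => rfl
  | cons x xs ih =>
    simp only [List.foldl_cons, List.reverse_cons, altLoop_append, altLoop, ih]

-- ===== VERDICT (by name: the statement is the Claim_ definition above) =====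
theorem onehot_mux_spec : Claim_equal_onehot_mux := by
  intro sel vals _ _
  unfold Spec_onehot_mux onehot_mux onehot_mux_alt
  cases vals with
  | nil => rfl
  | cons v0 vs => exact fold_eq_altLoop (sel.zip (v0 :: vs)) (Int.xor v0 v0)
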